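-- pv_equiv track=rewrite | github.com/onetest-ai/Octo | octo/telegram.py | _wrap_markdown_tables
-- ===== SOURCE A (Python) =====
-- def _wrap_markdown_tables(text: str) -> str:
--     """Wrap pipe-delimited markdown tables in code fences.
--
--     CommonMark doesn't support GFM tables, so we pre-wrap them in
--     code fences so they render as ``<pre>`` blocks in the HTML output.
--     """
--     lines = text.split("\n")
--     result = []
--     in_table = False
--     table_lines: list[str] = []
--
--     for line in lines:
--         stripped = line.strip()
--         is_table_line = stripped.startswith("|") and stripped.endswith("|")
--         is_separator = is_table_line and set(stripped.replace("|", "").replace("-", "").strip()) <= {" ", ":"}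
--
--         if is_table_line or (in_table and is_separator):
--             if not in_table:
--                 in_table = True
--                 table_lines = []
--             table_lines.append(line)
--         else:
--             if in_table:
--                 result.append("```")
--                 result.extend(table_lines)
--                 result.append("```")
--                 in_table = False
--                 table_lines = []
--             result.append(line)
--
--     if in_table:
--         result.append("```")
--         result.extend(table_lines)
--         result.append("```")
--
--     return "\n".join(result)
-- ===== SOURCE B (Python) =====
-- def _wrap_markdown_tables(text: str) -> str:
--     """Wrap pipe-delimited markdown tables in code fences.
--
--     Run-based rewrite: classify each line once (stripped starts and ends
--     with '|'; the separator branch of the original is redundant), then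
--     scan forward over maximal runs of table lines and fence each run.
--     """
--     def is_table(line: str) -> bool:
--         s = line.strip()
--         return s.startswith("|") and s.endswith("|")
--
--     lines = text.split("\n")
--     n = len(lines)
--     out = []
--     i = 0
--     while i < n:
--         if is_table(lines[i]):
--             j = i
--             while j < n and is_table(lines[j]):
--                 j += 1
--             out.append("```")
--             out.extend(lines[i:j])
--             out.append("```")
--             i = j
--         else:
--             out.append(lines[i])
--             i += 1
--     return "\n".join(out)
-- ===== Notes on version B (the rewrite author's own statement) =====
-- stated objective: simpler
-- what changed: Replaces the carry-state loop (in_table flag plus pending table_lines buffer and post-loop flush) with a single table-line predicate and a forward scan over maximal runs of table lines, fencing each run as it is found; the provably redundant separator branch is dropped.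
import Mathlib
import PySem

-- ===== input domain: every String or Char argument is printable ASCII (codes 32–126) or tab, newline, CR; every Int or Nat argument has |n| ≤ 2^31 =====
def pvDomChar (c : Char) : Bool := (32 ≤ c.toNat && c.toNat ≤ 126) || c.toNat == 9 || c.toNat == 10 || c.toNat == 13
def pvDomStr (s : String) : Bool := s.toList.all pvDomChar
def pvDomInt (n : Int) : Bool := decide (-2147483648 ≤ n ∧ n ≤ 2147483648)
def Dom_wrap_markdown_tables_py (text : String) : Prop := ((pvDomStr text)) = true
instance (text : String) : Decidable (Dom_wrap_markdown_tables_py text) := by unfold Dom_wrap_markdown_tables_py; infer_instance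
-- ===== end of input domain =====

-- B re-implements A with a table-line predicate and a forward scan over maximal runs
-- of table lines (the carry-state flag/buffer and the redundant separator branch go away);
-- objective: simpler.

-- ===== PORT A =====
-- one loop step of A, carried as structural recursion over the same state
-- (result, in_table, table_lines); the base case is the post-loop flush.
def wrapA_loop (lines : List String) (result : List String) (in_table : Bool)
    (table_lines : List String) : List String :=
  match lines with
  | [] => if in_table then result ++ ["```"] ++ table_lines ++ ["```"] else result
  | line :: rest =>
    let stripped := PySem.Str.strip line
    let is_table_line := PySem.Str.startswith stripped "|" && PySem.Str.endswith stripped "|"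
    let is_separator := is_table_line &&
      PySem.Set.issubset
        (PySem.Set.ofList (PySem.Str.strip (PySem.Str.replace (PySem.Str.replace stripped "|" "") "-" "")).toList)
        [' ', ':']
    if is_table_line || (in_table && is_separator) then
      if !in_table then wrapA_loop rest result true ([] ++ [line])
      else wrapA_loop rest result true (table_lines ++ [line])
    else
      if in_table then
        wrapA_loop rest (result ++ ["```"] ++ table_lines ++ ["```"] ++ [line]) false []
      else wrapA_loop rest (result ++ [line]) false []

def wrap_markdown_tables_py (text : String) : String :=
  -- sep is the literal "\n" ≠ "", so split? is never none
  PySem.Str.join "\n" (wrapA_loop ((PySem.Str.split? text "\n").getD []) [] false [])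

-- ===== PORT B =====
def isTableLine (line : String) : Bool :=
  let s := PySem.Str.strip line
  PySem.Str.startswith s "|" && PySem.Str.endswith s "|"

-- B's forward scan: on a table line take the whole maximal run and fence it.
def wrapB_go (lines : List String) : List String :=
  match lines with
  | [] => []
  | line :: rest =>
    if isTableLine line then
      "```" :: (List.takeWhile isTableLine (line :: rest)) ++
        "```" :: wrapB_go (List.dropWhile isTableLine (line :: rest))
    else
      line :: wrapB_go rest
termination_by lines.length
decreasing_by
  · have := List.length_dropWhile_le isTableLine rest
    simp [List.dropWhile, *]
  · simp

def wrap_markdown_tables_py_alt (text : String) : String :=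
  PySem.Str.join "\n" (wrapB_go ((PySem.Str.split? text "\n").getD []))

-- ===== PRECONDITION & SPEC =====
def Spec_wrap_markdown_tables_py (text : String) (out : String) : Prop := out = wrap_markdown_tables_py_alt text
instance (text : String) (out : String) : Decidable (Spec_wrap_markdown_tables_py text out) := by unfold Spec_wrap_markdown_tables_py; infer_instance

-- ===== CLAIM (what is proved, stated in full; the proofs are below) =====
def Claim_equal_wrap_markdown_tables_py : Prop := ∀ (text : String), Dom_wrap_markdown_tables_py text → Spec_wrap_markdown_tables_py text (wrap_markdown_tables_py text)

-- ===== LEMMAS AND PROOFS =====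

-- A's guard collapses to the table-line test: is_separator implies is_table_line.
lemma guard_eq (a b c : Bool) : (a || (b && (a && c))) = a := by
  cases a <;> cases b <;> cases c <;> rfl

-- one unfolding of A's loop, with the guard collapsed to B's predicate
lemma wrapA_loop_cons (line : String) (rest result : List String) (in_table : Bool)
    (table : List String) :
    wrapA_loop (line :: rest) result in_table table =
      if isTableLine line then
        (if in_table then wrapA_loop rest result true (table ++ [line])
         else wrapA_loop rest result true [line])
      else
        (if in_table then
           wrapA_loop rest (result ++ ["```"] ++ table ++ ["```"] ++ [line]) false []
         else wrapA_loop rest (result ++ [line]) false []) := by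
  simp only [wrapA_loop, guard_eq]
  cases h : (PySem.Str.startswith (PySem.Str.strip line) "|" &&
      PySem.Str.endswith (PySem.Str.strip line) "|") <;>
    (simp only [pysem, show "|".toList = ['|'] from rfl] at h) <;> cases in_table <;> simp [isTableLine, h]

-- joint loop invariant: the carry-state loop equals the run-scan,
-- both from the idle state and from inside a pending run.
lemma wrapA_loop_eq (lines : List String) :
    (∀ result table_lines,
        wrapA_loop lines result true table_lines =
          result ++ ["```"] ++ table_lines ++ List.takeWhile isTableLine lines ++
            "```" :: wrapB_go (List.dropWhile isTableLine lines)) ∧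
    (∀ result, wrapA_loop lines result false [] = result ++ wrapB_go lines) := by
  induction lines with
  | nil =>
    constructor
    · intro result table; simp [wrapA_loop, wrapB_go]
    · intro result; simp [wrapA_loop, wrapB_go]
  | cons line rest ih =>
    constructor
    · intro result table
      rw [wrapA_loop_cons]
      by_cases h : isTableLine line = true
      · rw [if_pos h, if_pos rfl, ih.1 result (table ++ [line]),
          List.takeWhile_cons_of_pos h, List.dropWhile_cons_of_pos h]
        simp
      · rw [if_neg h, if_pos rfl, ih.2, List.takeWhile_cons_of_neg h,
          List.dropWhile_cons_of_neg h, wrapB_go]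
        simp [h]
    · intro result
      rw [wrapA_loop_cons]
      by_cases h : isTableLine line = true
      · rw [if_pos h, if_neg (by simp), ih.1 result [line], wrapB_go,
          List.takeWhile_cons_of_pos h, List.dropWhile_cons_of_pos h]
        simp [h]
      · rw [if_neg h, if_neg (by simp), ih.2, wrapB_go]
        simp [h]

-- ===== VERDICT (by name: the statement is the Claim_ definition above) =====
theorem wrap_markdown_tables_py_spec : Claim_equal_wrap_markdown_tables_py := by
  intro text _
  unfold Spec_wrap_markdown_tables_py wrap_markdown_tables_py wrap_markdown_tables_py_alt
  rw [(wrapA_loop_eq _).2]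
  simp
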